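-- pv_equiv track=rewrite | github.com/wglu2010/net-automation | filter_plugins/filters.py | balance_graph
-- ===== SOURCE A (Python) =====
-- import collections
--
-- def balance_graph(graph):
--     """ Takes a list of neighbor tuples and returns it
--     reverse-sorted based on neighbor occurences  """
--
--     # Counts how many times each neighbor occurs
--     count = collections.Counter([x for (x,y) in graph]+[y for (x,y) in graph])
--
--     # Group neighbors based on neighbor occurence count
--     neigh_count = {}
--     for tup in graph:
--         total = count[tup[0]]+count[tup[1]]
--         if total in neigh_count:
--             neigh_count[total].append(tup)
--         else:
--             neigh_count[total] = [tup]
--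
--     # Within tuples with same neighbor count, reorder tuples so
--     # that the most occuring neighbor is first
--     reordered = []
--     for key in neigh_count:
--         value = neigh_count[key]
--         count = collections.Counter([x for (x,y) in value]+[y for (x,y) in value])
--         for tup in value:
--             if count[tup[1]] > count[tup[0]]:
--                 reordered.append((tup[1],tup[0],key))
--             else:
--                 reordered.append(tup+(key,))
--
--     # Reverse sort neighbor tuples based on neighbor count
--     reordered.sort(key=lambda item: item[2], reverse=True)
--
--     # Return list of neighbor tuples without neighbor count
--     return [(x,y) for (x,y,z) in reordered]
-- ===== SOURCE B (Python) =====
-- import collections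
--
-- def balance_graph(graph):
--     """ Takes a list of neighbor tuples and returns it
--     reverse-sorted based on neighbor occurences """
--     # Global endpoint counts, accumulated in one pass
--     count = collections.Counter()
--     for x, y in graph:
--         count[x] += 1
--         count[y] += 1
--     # Per-(total, element) occurrence table, replacing per-group re-Counters
--     totals = []
--     idx = collections.Counter()
--     for x, y in graph:
--         t = count[x] + count[y]
--         totals.append(t)
--         idx[(t, x)] += 1
--         idx[(t, y)] += 1
--     # Decorate tuples in original order, flipping by the per-total table
--     decorated = []
--     for (x, y), t in zip(graph, totals):
--         if idx[(t, y)] > idx[(t, x)]: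
--             decorated.append((y, x, t))
--         else:
--             decorated.append((x, y, t))
--     # One stable reverse sort by total; strip the totals
--     decorated.sort(key=lambda p: p[2], reverse=True)
--     return [(x, y) for (x, y, t) in decorated]
-- ===== Notes on version B (the rewrite author's own statement) =====
-- stated objective: alternative
-- what changed: Replaces A's total-keyed dict of group lists with per-group re-Counters by a single flat (total, element) occurrence table built in one pass, decorating the tuples in original order and relying on one stable reverse sort by total to recover A's grouped order.
import Mathlib
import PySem

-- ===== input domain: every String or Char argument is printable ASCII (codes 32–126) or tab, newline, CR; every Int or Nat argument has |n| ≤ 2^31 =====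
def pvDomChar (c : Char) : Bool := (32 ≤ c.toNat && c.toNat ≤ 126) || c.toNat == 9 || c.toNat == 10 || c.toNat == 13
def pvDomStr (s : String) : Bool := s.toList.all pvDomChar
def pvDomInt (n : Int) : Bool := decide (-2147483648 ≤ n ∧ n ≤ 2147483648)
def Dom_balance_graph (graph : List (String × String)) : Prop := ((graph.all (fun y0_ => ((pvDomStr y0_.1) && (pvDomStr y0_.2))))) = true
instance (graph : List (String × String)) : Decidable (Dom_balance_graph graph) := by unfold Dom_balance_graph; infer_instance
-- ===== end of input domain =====

-- B replaces A's total-keyed dict of group lists (with a fresh Counter per group) by one flat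
-- (total, element) occurrence table built in a single pass, decorating the tuples in original
-- order and using one stable reverse sort by total; same result, alternative decomposition.

-- ===== PORT A =====
def balance_graph (graph : List (String × String)) : List (String × String) :=
  -- count = collections.Counter([x for (x,y) in graph] + [y for (x,y) in graph])
  let count : PySem.Dict String Int :=
    PySem.Dict.counter (graph.map (fun p => p.1) ++ graph.map (fun p => p.2))
  -- grouping loop building neigh_count
  let neigh_count : PySem.Dict Int (List (String × String)) :=
    graph.foldl (fun d tup =>
      let total := count.getD tup.1 0 + count.getD tup.2 0
      if d.contains total then d.insert total (d.getD total [] ++ [tup])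
      else d.insert total [tup]) PySem.Dict.empty
  -- 'for key in neigh_count' with a fresh Counter per group
  let reordered : List (String × String × Int) :=
    neigh_count.keys.foldl (fun acc key =>
      let value := neigh_count.getD key []
      let cnt : PySem.Dict String Int :=
        PySem.Dict.counter (value.map (fun p => p.1) ++ value.map (fun p => p.2))
      value.foldl (fun acc tup =>
        if cnt.getD tup.2 0 > cnt.getD tup.1 0 then acc ++ [(tup.2, tup.1, key)]
        else acc ++ [(tup.1, tup.2, key)]) acc) []
  -- reordered.sort(key=lambda item: item[2], reverse=True); strip the counts
  (PySem.List.sorted reordered (fun it => it.2.2) true).map (fun it => (it.1, it.2.1))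

-- ===== PORT B =====
def balance_graph_alt (graph : List (String × String)) : List (String × String) :=
  -- global endpoint Counter, accumulated in one pass
  let count : PySem.Dict String Int :=
    graph.foldl (fun d p => (d.modify p.1 0 (· + 1)).modify p.2 0 (· + 1)) PySem.Dict.empty
  -- totals list and flat (total, element) occurrence table, one pass
  let st := graph.foldl
    (fun (st : List Int × PySem.Dict (Int × String) Int) p =>
      let t := count.getD p.1 0 + count.getD p.2 0
      (st.1 ++ [t], (st.2.modify (t, p.1) 0 (· + 1)).modify (t, p.2) 0 (· + 1)))
    ([], PySem.Dict.empty)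
  let totals := st.1
  let idx := st.2
  -- decorate the tuples in original order, flipping by the per-total table
  let decorated : List (String × String × Int) :=
    (graph.zip totals).foldl (fun acc q =>
      if idx.getD (q.2, q.1.2) 0 > idx.getD (q.2, q.1.1) 0 then acc ++ [(q.1.2, q.1.1, q.2)]
      else acc ++ [(q.1.1, q.1.2, q.2)]) []
  -- one stable reverse sort by total; strip the totals
  (PySem.List.sorted decorated (fun p => p.2.2) true).map (fun p => (p.1, p.2.1))

-- ===== PRECONDITION & SPEC =====
def Spec_balance_graph (graph : List (String × String)) (out : List (String × String)) : Prop := out = balance_graph_alt graph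
instance (graph : List (String × String)) (out : List (String × String)) : Decidable (Spec_balance_graph graph out) := by unfold Spec_balance_graph; infer_instance

-- ===== CLAIM (what is proved, stated in full; the proofs are below) =====
def Claim_equal_balance_graph : Prop := ∀ (graph : List (String × String)), Dom_balance_graph graph → Spec_balance_graph graph (balance_graph graph)

-- ===== LEMMAS AND PROOFS =====

-- total number of occurrences of e as an endpoint of a tuple of l
def pvCntE (l : List (String × String)) (e : String) : Nat :=
  l.countP (fun p => p.1 == e) + l.countP (fun p => p.2 == e)

-- combined occurrence count of the two endpoints of p (the programs' 'total')
def pvTot (g : List (String × String)) (p : String × String) : Int :=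
  (pvCntE g p.1 : Int) + (pvCntE g p.2 : Int)

-- the tuples of g whose total is t, in original order (A's group for key t)
def pvGrp (g : List (String × String)) (t : Int) : List (String × String) :=
  g.filter (fun p => pvTot g p == t)

-- the decorated, possibly flipped triple both programs build for p
def pvDec (g : List (String × String)) (p : String × String) : String × String × Int :=
  if (pvCntE (pvGrp g (pvTot g p)) p.1 : Int) < (pvCntE (pvGrp g (pvTot g p)) p.2 : Int)
  then (p.2, p.1, pvTot g p) else (p.1, p.2, pvTot g p)

lemma pvDec_key (g : List (String × String)) (p : String × String) :
    (pvDec g p).2.2 = pvTot g p := by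
  unfold pvDec; split <;> rfl

lemma counter_ends_getD (l : List (String × String)) (e : String) :
    (PySem.Dict.counter (l.map (fun p => p.1) ++ l.map (fun p => p.2))).getD e 0
      = (pvCntE l e : Int) := by
  rw [PySem.Dict.getD_counter]
  simp [pvCntE, List.count_eq_countP, List.countP_append, List.countP_map, Function.comp_def]

lemma getD_modify2 {κ : Type} [BEq κ] [LawfulBEq κ] (g1 g2 : (String × String) → κ) :
    ∀ (l : List (String × String)) (d : PySem.Dict κ Int) (k : κ),
    (l.foldl (fun d p => (d.modify (g1 p) 0 (· + 1)).modify (g2 p) 0 (· + 1)) d).getD k 0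
      = d.getD k 0 + (l.countP (fun p => g1 p == k) : Int)
        + (l.countP (fun p => g2 p == k) : Int) := by
  intro l
  induction l with
  | nil => intro d k; simp
  | cons p l ih =>
    intro d k
    rw [List.foldl_cons, ih, List.countP_cons, List.countP_cons]
    have h2 : ((d.modify (g1 p) 0 (· + 1)).modify (g2 p) 0 (· + 1)).getD k 0
        = d.getD k 0 + (if g1 p == k then 1 else 0) + (if g2 p == k then 1 else 0) := by
      by_cases hb : k = g2 p
      · subst hb
        rw [PySem.Dict.getD_modify_self]
        by_cases ha : g2 p = g1 p
        · rw [ha, PySem.Dict.getD_modify_self]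
          simp
        · rw [PySem.Dict.getD_modify_of_ne _ _ _ ha]
          simp [beq_iff_eq, Ne.symm ha]
      · rw [PySem.Dict.getD_modify_of_ne _ _ _ hb]
        by_cases ha : k = g1 p
        · rw [ha, PySem.Dict.getD_modify_self]
          rw [← ha]
          simp [beq_iff_eq, Ne.symm hb]
        · rw [PySem.Dict.getD_modify_of_ne _ _ _ ha]
          simp [beq_iff_eq, Ne.symm ha, Ne.symm hb]
    rw [h2]
    split_ifs <;> push_cast <;> omega

lemma insertBy_skip {α : Type} (before : α → α → Bool) (x : α) :
    ∀ (l1 l2 : List α), (∀ b ∈ l1, before x b = false) →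
    PySem.List.insertBy before x (l1 ++ l2) = l1 ++ PySem.List.insertBy before x l2 := by
  intro l1
  induction l1 with
  | nil => intro l2 _; rfl
  | cons b l1 ih =>
    intro l2 h
    rw [List.cons_append]
    show PySem.List.insertBy before x (b :: (l1 ++ l2)) = _
    rw [PySem.List.insertBy]
    simp only [h b (List.mem_cons_self ..)]
    simp only [Bool.false_eq_true, if_false]
    rw [ih l2 (fun b hb => h b (List.mem_cons_of_mem _ hb))]
    rfl

lemma insertBy_front {α : Type} (before : α → α → Bool) (x : α) (zs : List α)
    (h : ∀ b ∈ zs, before x b = true) :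
    PySem.List.insertBy before x zs = x :: zs := by
  cases zs with
  | nil => rfl
  | cons b t => rw [PySem.List.insertBy]; simp [h b (List.mem_cons_self ..)]

lemma ib_flat {α : Type} (key : α → Int) (x : α) (xs : List α) :
    ∀ (L : List Int), L.Pairwise (fun a b => b < a) → key x ∈ L →
    PySem.List.insertBy (fun a b => decide (key b < key a)) x
        (L.flatMap fun k => xs.filter fun a => decide (key a = k))
      = L.flatMap fun k => (xs ++ [x]).filter fun a => decide (key a = k) := by
  intro L
  induction L with
  | nil => intro _ hm; exact absurd hm (List.not_mem_nil)
  | cons k L ih =>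
    intro hpw hm
    rw [List.pairwise_cons] at hpw
    obtain ⟨hk, hpw'⟩ := hpw
    rw [List.flatMap_cons, List.flatMap_cons]
    have hfx : ∀ (t : Int), (xs ++ [x]).filter (fun a => decide (key a = t))
        = xs.filter (fun a => decide (key a = t)) ++ if key x = t then [x] else [] := by
      intro t
      rw [List.filter_append]
      congr 1
      simp [List.filter_singleton]
    by_cases hxk : key x = k
    · -- x belongs to the first block: goes right after it
      rw [insertBy_skip _ _ _ _ (by
        intro b hb
        rw [List.mem_filter] at hb
        have : key b = k := by simpa using hb.2
        simp [this, hxk])]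
      rw [insertBy_front _ _ _ (by
        intro b hb
        rw [List.mem_flatMap] at hb
        obtain ⟨t, ht, hbf⟩ := hb
        rw [List.mem_filter] at hbf
        have hbt : key b = t := by simpa using hbf.2
        have : t < k := hk t ht
        simp [hbt, hxk]
        omega)]
      rw [hfx k, if_pos hxk]
      have htail : (L.flatMap fun t => (xs ++ [x]).filter fun a => decide (key a = t))
          = L.flatMap fun t => xs.filter fun a => decide (key a = t) := by
        apply List.flatMap_congr
        intro t ht
        rw [hfx t]
        have : key x ≠ t := by have := hk t ht; omega
        simp [this]
      rw [htail]
      simp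
    · -- x belongs to a later block
      have hm' : key x ∈ L := by
        rcases List.mem_cons.mp hm with h | h
        · exact absurd h hxk
        · exact h
      have hxlt : key x < k := hk _ hm'
      rw [insertBy_skip _ _ _ _ (by
        intro b hb
        rw [List.mem_filter] at hb
        have : key b = k := by simpa using hb.2
        simp [this]
        omega)]
      rw [ih hpw' hm', hfx k, if_neg hxk]
      simp

lemma sorted_canon {α : Type} (key : α → Int) (xs : List α) :
    ∀ (L : List Int), L.Pairwise (fun a b => b < a) → (∀ a ∈ xs, key a ∈ L) →
    PySem.List.sorted xs key true
      = L.flatMap fun k => xs.filter fun a => decide (key a = k) := by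
  induction xs using List.reverseRecOn with
  | nil =>
    intro L _ _
    rw [(PySem.List.sorted_eq_nil_iff _ _ _).mpr rfl]
    simp
  | append_singleton xs x ih =>
    intro L hpw hmem
    rw [PySem.List.sorted_rev_eq_foldl_insertBy, List.foldl_append, List.foldl_cons,
      List.foldl_nil, ← PySem.List.sorted_rev_eq_foldl_insertBy,
      ih L hpw (fun a ha => hmem a (List.mem_append_left _ ha))]
    exact ib_flat key x xs L hpw (hmem x (by simp))

lemma filter_flatMap_group (G : Int → List (String × String × Int))
    (hkey : ∀ k, ∀ q ∈ G k, q.2.2 = k) :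
    ∀ (K : List Int), K.Nodup → ∀ t ∈ K,
    (K.flatMap G).filter (fun q => decide (q.2.2 = t)) = G t := by
  intro K
  induction K with
  | nil => intro _ t ht; exact absurd ht (List.not_mem_nil)
  | cons k K ih =>
    intro hnd t ht
    rw [List.flatMap_cons, List.filter_append]
    rcases List.mem_cons.mp ht with h | h
    · subst h
      have h1 : (G t).filter (fun q => decide (q.2.2 = t)) = G t := by
        apply List.filter_eq_self.mpr
        intro q hq
        simp [hkey t q hq]
      have h2 : (K.flatMap G).filter (fun q => decide (q.2.2 = t)) = [] := by
        apply List.filter_eq_nil_iff.mpr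
        intro q hq
        rw [List.mem_flatMap] at hq
        obtain ⟨u, hu, hqG⟩ := hq
        have := hkey u q hqG
        have hne : u ≠ t := fun he => (List.nodup_cons.mp hnd).1 (he ▸ hu)
        simp [this, hne]
      rw [h1, h2, List.append_nil]
    · have hkt : k ≠ t := fun he => (List.nodup_cons.mp hnd).1 (he ▸ h)
      have h1 : (G k).filter (fun q => decide (q.2.2 = t)) = [] := by
        apply List.filter_eq_nil_iff.mpr
        intro q hq
        simp [hkey k q hq, hkt]
      rw [h1, List.nil_append]
      exact ih (List.nodup_cons.mp hnd).2 t h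

lemma keys_modL (g : List (String × String)) :
    ∀ (l : List (String × String)) (d : PySem.Dict Int (List (String × String))),
    (l.foldl (fun d p => d.modify (pvTot g p) [] (· ++ [p])) d).keys
      = (l.map (pvTot g)).foldl PySem.Set.add d.keys := by
  intro l
  induction l with
  | nil => intro d; rfl
  | cons p l ih =>
    intro d
    rw [List.foldl_cons, ih, List.map_cons, List.foldl_cons]
    congr 1
    rw [PySem.Dict.keys_modify]
    by_cases hc : d.contains (pvTot g p) = true
    · rw [PySem.Dict.keys_insert_of_contains _ _ hc]
      have hmem : pvTot g p ∈ d.keys := (PySem.Dict.contains_iff_mem_keys _ _).mp hc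
      simp [PySem.Set.add, PySem.Set.contains, hmem]
    · rw [PySem.Dict.keys_insert_of_not_contains _ _ (by simpa using hc)]
      have hmem : pvTot g p ∉ d.keys := fun h =>
        hc ((PySem.Dict.contains_iff_mem_keys _ _).mpr h)
      simp [PySem.Set.add, PySem.Set.contains, hmem]

lemma zip_map_self {α β : Type} (f : α → β) :
    ∀ (l : List α), l.zip (l.map f) = l.map (fun p => (p, f p)) := by
  intro l
  induction l with
  | nil => rfl
  | cons a l ih => simp [ih]

lemma pair_countP (g : List (String × String)) (pick : (String × String) → String)
    (t : Int) (e : String) :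
    g.countP (fun p => (pvTot g p, pick p) == (t, e))
      = (pvGrp g t).countP (fun p => pick p == e) := by
  rw [pvGrp, List.countP_filter]
  apply List.countP_congr
  intro p _
  simp [beq_iff_eq, Prod.ext_iff, and_comm]

lemma A_reordered (g : List (String × String)) :
    balance_graph g
      = (PySem.List.sorted
          ((PySem.Set.ofList (g.map (pvTot g))).flatMap fun t => (pvGrp g t).map (pvDec g))
          (fun it => it.2.2) true).map (fun it => (it.1, it.2.1)) := by
  have htot : ∀ p : String × String,
      (pvCntE g p.1 : Int) + (pvCntE g p.2 : Int) = pvTot g p := fun _ => rfl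
  simp only [balance_graph, counter_ends_getD, htot]
  -- the grouping fold is the modify fold
  have hA1 : (g.foldl (fun d tup =>
        if d.contains (pvTot g tup) = true then
          d.insert (pvTot g tup) (d.getD (pvTot g tup) [] ++ [tup])
        else d.insert (pvTot g tup) [tup]) PySem.Dict.empty)
      = g.foldl (fun d p => d.modify (pvTot g p) [] (· ++ [p])) PySem.Dict.empty := by
    apply PySem.List.foldl_congr_mem
    intro d p _
    by_cases hc : d.contains (pvTot g p) = true
    · simp only [hc, if_true, PySem.Dict.modify]
    · have hnone : d.get? (pvTot g p) = none :=
        (PySem.Dict.get?_eq_none_iff_contains _ _).mpr (by simpa using hc)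
      simp only [hc, PySem.Dict.modify, PySem.Dict.getD, hnone, Option.getD_none,
        List.nil_append]
      simp
  rw [hA1]
  -- lookups in the grouping dict are the groups
  have hMap : g.foldl (fun d p => d.modify (pvTot g p) [] (· ++ [p])) PySem.Dict.empty
      = (g.map (fun p => (pvTot g p, p))).foldl
          (fun d q => d.modify q.1 [] (· ++ [q.2])) PySem.Dict.empty := by
    rw [List.foldl_map]
  have hN : ∀ t : Int,
      (g.foldl (fun d p => d.modify (pvTot g p) [] (· ++ [p])) PySem.Dict.empty).getD t []
        = pvGrp g t := by
    intro t
    rw [hMap, PySem.Dict.getD_foldl_modify_append]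
    simp [List.filter_map, Function.comp_def, pvGrp]
  -- the keys are the distinct totals in first-occurrence order
  have hK : (g.foldl (fun d p => d.modify (pvTot g p) [] (· ++ [p])) PySem.Dict.empty).keys
      = PySem.Set.ofList (g.map (pvTot g)) := by
    rw [keys_modL, PySem.Set.ofList_eq_foldl]
    rfl
  -- the reordering loop maps each group through pvDec
  have hOut : ∀ (acc : List (String × String × Int)) (t : Int),
      ((g.foldl (fun d p => d.modify (pvTot g p) [] (· ++ [p])) PySem.Dict.empty).getD t
          []).foldl (fun acc tup =>
            if (pvCntE ((g.foldl (fun d p => d.modify (pvTot g p) [] (· ++ [p]))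
                  PySem.Dict.empty).getD t []) tup.1 : Int)
                < (pvCntE ((g.foldl (fun d p => d.modify (pvTot g p) [] (· ++ [p]))
                  PySem.Dict.empty).getD t []) tup.2 : Int)
            then acc ++ [(tup.2, tup.1, t)] else acc ++ [(tup.1, tup.2, t)]) acc
      = acc ++ (pvGrp g t).map (pvDec g) := by
    intro acc t
    rw [hN t]
    rw [PySem.List.foldl_congr_mem _ _ (fun acc tup => acc ++ [pvDec g tup]) _ (by
      intro acc tup hmem
      have htup : pvTot g tup = t := by
        have := (List.mem_filter.mp hmem).2
        simpa [beq_iff_eq] using this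
      show _ = acc ++ [pvDec g tup]
      unfold pvDec
      rw [htup]
      split <;> rfl)]
    rw [PySem.List.foldl_append_singleton_eq_map]
  rw [PySem.List.foldl_congr_mem _ _
    (fun acc t => acc ++ (pvGrp g t).map (pvDec g)) _ (fun acc t _ => hOut acc t)]
  rw [PySem.List.foldl_append_eq_flatMap, hK, List.nil_append]

lemma B_decorated (g : List (String × String)) :
    balance_graph_alt g
      = (PySem.List.sorted (g.map (pvDec g)) (fun p => p.2.2) true).map
          (fun p => (p.1, p.2.1)) := by
  have htot : ∀ p : String × String,
      (pvCntE g p.1 : Int) + (pvCntE g p.2 : Int) = pvTot g p := fun _ => rfl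
  have hcount : ∀ e : String,
      (g.foldl (fun d p => (d.modify p.1 0 (· + 1)).modify p.2 0 (· + 1))
        PySem.Dict.empty).getD e 0 = (pvCntE g e : Int) := by
    intro e
    rw [getD_modify2 (fun p => p.1) (fun p => p.2)]
    simp [pvCntE]
  simp only [balance_graph_alt, hcount, htot]
  have hsplit : (g.foldl (fun (st : List Int × PySem.Dict (Int × String) Int) p =>
        (st.1 ++ [pvTot g p],
          (st.2.modify (pvTot g p, p.1) 0 (· + 1)).modify (pvTot g p, p.2) 0 (· + 1)))
      ([], PySem.Dict.empty))
      = (g.foldl (fun acc p => acc ++ [pvTot g p]) [],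
         g.foldl (fun d p =>
           (d.modify (pvTot g p, p.1) 0 (· + 1)).modify (pvTot g p, p.2) 0 (· + 1))
           PySem.Dict.empty) :=
    PySem.List.foldl_prod_mk (fun (acc : List Int) p => acc ++ [pvTot g p])
      (fun (d : PySem.Dict (Int × String) Int) p =>
        (d.modify (pvTot g p, p.1) 0 (· + 1)).modify (pvTot g p, p.2) 0 (· + 1))
      g [] PySem.Dict.empty
  rw [hsplit]
  simp only [PySem.List.foldl_append_singleton_eq_map, List.nil_append]
  have hidx : ∀ (t : Int) (e : String),
      (g.foldl (fun d p =>
          (d.modify (pvTot g p, p.1) 0 (· + 1)).modify (pvTot g p, p.2) 0 (· + 1))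
        PySem.Dict.empty).getD (t, e) 0 = (pvCntE (pvGrp g t) e : Int) := by
    intro t e
    rw [getD_modify2 (fun p => (pvTot g p, p.1)) (fun p => (pvTot g p, p.2))]
    rw [pair_countP g (fun p => p.1), pair_countP g (fun p => p.2)]
    simp [pvCntE]
  rw [zip_map_self, List.foldl_map]
  rw [PySem.List.foldl_congr_mem _ _ (fun acc p => acc ++ [pvDec g p]) _ (by
    intro acc p _
    simp only [hidx]
    show _ = acc ++ [pvDec g p]
    unfold pvDec
    split <;> rfl)]
  rw [PySem.List.foldl_append_singleton_eq_map, List.nil_append]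

lemma canon_eq (g : List (String × String)) :
    (PySem.List.sorted
        ((PySem.Set.ofList (g.map (pvTot g))).flatMap fun t => (pvGrp g t).map (pvDec g))
        (fun it => it.2.2) true).map (fun it => (it.1, it.2.1))
      = (PySem.List.sorted (g.map (pvDec g)) (fun p => p.2.2) true).map
          (fun p => (p.1, p.2.1)) := by
  have hSmem : ∀ t : Int, t ∈ PySem.Set.ofList (g.map (pvTot g)) ↔ t ∈ g.map (pvTot g) :=
    fun t => PySem.Set.mem_ofList _ _
  have hLpw : ((PySem.List.sorted (PySem.Set.ofList (g.map (pvTot g))) (fun x => x)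
      false).reverse).Pairwise (fun a b => b < a) := by
    rw [List.pairwise_reverse]
    exact PySem.List.sorted_ofList_pairwise_lt _
  have hLmem : ∀ t : Int, t ∈ (PySem.List.sorted (PySem.Set.ofList (g.map (pvTot g)))
      (fun x => x) false).reverse ↔ t ∈ g.map (pvTot g) := by
    intro t
    rw [List.mem_reverse, PySem.List.mem_sorted]
    exact hSmem t
  have hGkey : ∀ k : Int, ∀ q ∈ (pvGrp g k).map (pvDec g), q.2.2 = k := by
    intro k q hq
    rw [List.mem_map] at hq
    obtain ⟨p, hp, rfl⟩ := hq
    rw [pvDec_key]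
    have := (List.mem_filter.mp hp).2
    simpa [beq_iff_eq] using this
  rw [sorted_canon _ _ ((PySem.List.sorted (PySem.Set.ofList (g.map (pvTot g)))
      (fun x => x) false).reverse) hLpw (by
    intro q hq
    rw [List.mem_flatMap] at hq
    obtain ⟨t, ht, hq⟩ := hq
    rw [hLmem]
    rw [hGkey t q hq]
    exact (hSmem t).mp ht)]
  rw [sorted_canon _ _ ((PySem.List.sorted (PySem.Set.ofList (g.map (pvTot g)))
      (fun x => x) false).reverse) hLpw (by
    intro q hq
    rw [List.mem_map] at hq
    obtain ⟨p, hp, rfl⟩ := hq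
    rw [hLmem, pvDec_key]
    exact List.mem_map_of_mem hp)]
  congr 1
  apply List.flatMap_congr
  intro t ht
  have htK : t ∈ PySem.Set.ofList (g.map (pvTot g)) := (hSmem t).mpr ((hLmem t).mp ht)
  rw [filter_flatMap_group _ hGkey _ (PySem.Set.nodup_ofList _) t htK]
  rw [List.filter_map]
  congr 1
  apply List.filter_congr
  intro p _
  show (pvTot g p == t) = decide ((pvDec g p).2.2 = t)
  rw [pvDec_key]
  apply Bool.eq_iff_iff.mpr
  simp

-- ===== VERDICT (by name: the statement is the Claim_ definition above) =====
theorem balance_graph_spec : Claim_equal_balance_graph := by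
  intro g _
  show balance_graph g = balance_graph_alt g
  rw [A_reordered, B_decorated]
  exact canon_eq g
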